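-- pv_equiv track=rewrite | github.com/london-python-project-nights/romaine | src/romaine/parser/simple.py | get_section_start
-- ===== SOURCE A (Python) =====
-- def get_section_start(line):
--     """
--         Determines whether a line starts a Background, Scenario, Examples,
--         or Scenario Outline section.
--
--         Keyword arguments:
--         line - The line to check.
--
--         Returns:
--         The lowercase section type (e.g. 'examples') if this line starts a
--         section. None otherwise.
--     """
--     line = line.lstrip()
--
--     section_type = None
--     description = None
--
--     sections = {
--         'Examples:': 'examples',
--         'Background:': 'background',
--         'Scenario:': 'scenario',
--         'Scenario Outline:': 'scenario outline',
--     }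
--
--     for section, section_type_candidate in sections.items():
--         if line.startswith(section):
--             section_type = section_type_candidate
--             description = line.split(':', 1)[1]
--             break
--
--     return {
--         'type': section_type,
--         'description': description,
--     }
-- ===== SOURCE B (Python) =====
-- def get_section_start(line):
--     """Parse-first re-implementation: split once at the first colon and
--     look the keyword up in a table, instead of scanning key prefixes."""
--     sections = {
--         'Examples': 'examples',
--         'Background': 'background',
--         'Scenario': 'scenario',
--         'Scenario Outline': 'scenario outline',
--     }
--     head, sep, description = line.lstrip().partition(':')
--     section_type = sections.get(head) if sep else None
--     if section_type is None:
--         return {'type': None, 'description': None}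
--     return {'type': section_type, 'description': description}
-- ===== Notes on version B (the rewrite author's own statement) =====
-- stated objective: simpler
-- what changed: Replaces the prefix-scanning loop over the four section keys with a single parse (partition at the first colon) followed by one table lookup on the keyword; the no-colon case falls out of the empty separator instead of a failed scan.
import Mathlib
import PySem

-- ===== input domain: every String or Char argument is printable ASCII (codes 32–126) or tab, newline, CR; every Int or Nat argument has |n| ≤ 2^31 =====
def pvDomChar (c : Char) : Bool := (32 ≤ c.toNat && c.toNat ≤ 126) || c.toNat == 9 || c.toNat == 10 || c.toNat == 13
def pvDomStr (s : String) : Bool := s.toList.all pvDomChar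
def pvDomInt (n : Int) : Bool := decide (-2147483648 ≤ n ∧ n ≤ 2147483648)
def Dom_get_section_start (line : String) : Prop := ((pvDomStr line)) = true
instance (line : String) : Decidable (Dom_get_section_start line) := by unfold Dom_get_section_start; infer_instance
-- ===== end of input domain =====

-- B replaces A's prefix-scanning loop over the section keys by one partition at
-- the first colon plus a single table lookup on the keyword ('simpler').

-- ===== PORT A =====
def pvSectionsA : List (String × String) :=
  [("Examples:", "examples"), ("Background:", "background"),
   ("Scenario:", "scenario"), ("Scenario Outline:", "scenario outline")]

-- line.split(':', 1)[1] — in A this is only reached after a key containing ':'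
-- matched as a prefix, so index 1 is always in range (pyGet? none = IndexError)
def pvDescA (line : String) : Option String :=
  (PySem.Str.splitMax? line ":" 1).bind (fun ps => PySem.List.pyGet? ps 1)

-- the for-loop over sections.items() with break: the first key that is a prefix wins
def pvLoopA (line : String) : List (String × String) → Option String × Option String
  | [] => (none, none)
  | (sec, cand) :: rest =>
      if PySem.Str.startswith line sec then (some cand, pvDescA line)
      else pvLoopA line rest

def get_section_start (line : String) : List (String × Option String) :=
  let line := PySem.Str.lstrip line
  let td := pvLoopA line pvSectionsA
  [("type", td.1), ("description", td.2)]

-- ===== PORT B =====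
-- Source B's dict, keyed by the keyword before the colon (Chars-level keys)
def pvSectionsB : PySem.Dict (List Char) String :=
  ⟨[("Examples".toList, "examples"), ("Background".toList, "background"),
    ("Scenario".toList, "scenario"), ("Scenario Outline".toList, "scenario outline")]⟩

-- str.partition(':') ported by hand over List Char (exact: the separator is a
-- single char; returns (head, separator found?, tail))
def pvPartitionColon : List Char → List Char × Bool × List Char
  | [] => ([], false, [])
  | c :: cs =>
      if c = ':' then ([], true, cs)
      else
        let p := pvPartitionColon cs
        (c :: p.1, p.2.1, p.2.2)

def get_section_start_alt (line : String) : List (String × Option String) :=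
  let p := pvPartitionColon (PySem.Chars.lstrip line.toList)
  let sectionType := if p.2.1 then PySem.Dict.get? pvSectionsB p.1 else none
  match sectionType with
  | none => [("type", none), ("description", none)]
  | some t => [("type", some t), ("description", some (String.ofList p.2.2))]

-- ===== PRECONDITION & SPEC =====
def Spec_get_section_start (line : String) (out : List (String × Option String)) : Prop := out = get_section_start_alt line
instance (line : String) (out : List (String × Option String)) : Decidable (Spec_get_section_start line out) := by unfold Spec_get_section_start; infer_instance

-- ===== CLAIM (what is proved, stated in full; the proofs are below) =====
def Claim_equal_get_section_start : Prop := ∀ (line : String), Dom_get_section_start line → Spec_get_section_start line (get_section_start line)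

-- ===== LEMMAS AND PROOFS =====
theorem pv_go_zero (fuel : Nat) (l cur : List Char) (acc : List (List Char)) :
    PySem.Chars.splitOnMax.go [':'] fuel 0 l cur acc = ((cur.reverse ++ l) :: acc).reverse := by
  cases fuel with
  | zero => simp [PySem.Chars.splitOnMax.go]
  | succ f => cases l with
    | nil => simp [PySem.Chars.splitOnMax.go]
    | cons c cs => simp [PySem.Chars.splitOnMax.go]

theorem pv_go_one_colon (k : List Char) (r : List Char) (fuel : Nat) (cur : List Char)
    (acc : List (List Char)) (hk : ':' ∉ k) (hf : k.length < fuel) :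
    PySem.Chars.splitOnMax.go [':'] fuel 1 (k ++ ':' :: r) cur acc
      = acc.reverse ++ [cur.reverse ++ k, r] := by
  induction k generalizing fuel cur acc with
  | nil =>
    cases fuel with
    | zero => omega
    | succ f =>
      simp only [List.nil_append]
      rw [PySem.Chars.splitOnMax.go]
      simp [List.isPrefixOf, pv_go_zero]
  | cons c k' ih =>
    cases fuel with
    | zero => omega
    | succ f =>
      simp at hk
      have hc : (':' == c) = false := by simp; exact hk.1
      simp only [List.cons_append]
      rw [PySem.Chars.splitOnMax.go]
      simp [List.isPrefixOf, hc]
      rw [ih f (c :: cur) acc hk.2 (by simpa using hf)]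
      simp

theorem pv_splitOnMax_colon (k r : List Char) (hk : ':' ∉ k) :
    PySem.Chars.splitOnMax (k ++ ':' :: r) [':'] 1 = [k, r] := by
  rw [PySem.Chars.splitOnMax]
  simp only [List.length_append, List.length_cons]
  norm_num
  rw [pv_go_one_colon k r _ [] [] hk (by omega)]
  simp

theorem pv_startswith_no_colon (L s : List Char) (hL : ':' ∉ L) (hs : ':' ∈ s) :
    PySem.Chars.startswith L s = false := by
  rw [PySem.Chars.startswith]
  by_contra hb
  simp at hb
  exact hL (hb.mem hs)

theorem pv_first_colon_unique : ∀ (k s r t : List Char), ':' ∉ k → ':' ∉ s →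
    k ++ ':' :: r = s ++ ':' :: t → k = s ∧ r = t := by
  intro k
  induction k with
  | nil =>
    intro s r t hk hs h
    cases s with
    | nil => simpa using h
    | cons c s' =>
      simp at h
      exact absurd (by simp [← h.1]) hs
  | cons c k' ih =>
    intro s r t hk hs h
    cases s with
    | nil =>
      simp at h
      exact absurd (by simp [h.1]) hk
    | cons d s' =>
      simp at h
      simp at hk hs
      rcases ih s' r t hk.2 hs.2 h.2 with ⟨h1, h2⟩
      exact ⟨by simp [h.1, h1], h2⟩

theorem pv_startswith_colon (k r s : List Char) (hk : ':' ∉ k) (hs : ':' ∉ s) :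
    PySem.Chars.startswith (k ++ ':' :: r) (s ++ [':']) = (k == s) := by
  rw [PySem.Chars.startswith]
  by_cases hks : k = s
  · subst hks
    simp [List.isPrefixOf_iff_prefix]
  · have hp : ((s ++ [':']).isPrefixOf (k ++ ':' :: r)) = false := by
      rw [Bool.eq_false_iff]
      intro hb
      rcases List.isPrefixOf_iff_prefix.mp hb with ⟨t, ht⟩
      have ht' : s ++ ':' :: t = k ++ ':' :: r := by simpa using ht
      exact hks (pv_first_colon_unique s k t r hs hk ht').1.symm
    rw [hp]
    exact (beq_eq_false_iff_ne.mpr hks).symm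

theorem pv_partition_no_colon (L : List Char) (h : ':' ∉ L) :
    pvPartitionColon L = (L, false, []) := by
  induction L with
  | nil => rfl
  | cons c cs ih =>
    simp at h
    have hc : ¬ c = ':' := fun hh => h.1 hh.symm
    simp [pvPartitionColon, hc, ih h.2]

theorem pv_partition_colon (k r : List Char) (hk : ':' ∉ k) :
    pvPartitionColon (k ++ ':' :: r) = (k, true, r) := by
  induction k with
  | nil => simp [pvPartitionColon]
  | cons c k' ih =>
    simp at hk
    have hc : ¬ c = ':' := fun hh => hk.1 hh.symm
    simp [pvPartitionColon, hc, ih hk.2]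

theorem pv_descA_eq (s : String) (k r : List Char) (hs : s.toList = k ++ ':' :: r)
    (hk : ':' ∉ k) : pvDescA s = some (String.ofList r) := by
  rw [pvDescA, PySem.Str.splitMax?, hs]
  have : (":" : String).toList = [':'] := rfl
  rw [this, PySem.Chars.splitMax?]
  simp [pv_splitOnMax_colon k r hk, PySem.List.pyGet?, PySem.List.pyIdx?]

theorem pv_exists_first_colon (L : List Char) (h : ':' ∈ L) :
    ∃ k r, ':' ∉ k ∧ L = k ++ ':' :: r := by
  induction L with
  | nil => cases h
  | cons c cs ih =>
    by_cases hc : c = ':'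
    · exact ⟨[], cs, by simp, by simp [hc]⟩
    · have h' : ':' ∈ cs := by
        rcases List.mem_cons.mp h with h | h
        · exact absurd h.symm hc
        · exact h
      rcases ih h' with ⟨k, r, hk, hL⟩
      refine ⟨c :: k, r, ?_, by simp [hL]⟩
      intro hm
      rcases List.mem_cons.mp hm with h2 | h2
      · exact hc h2.symm
      · exact hk h2

theorem pv_main (line : String) :
    get_section_start line = get_section_start_alt line := by
  rw [get_section_start, get_section_start_alt]
  have hls : (PySem.Str.lstrip line).toList = PySem.Chars.lstrip line.toList :=
    PySem.Str.toList_lstrip line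
  set L := PySem.Chars.lstrip line.toList with hL
  by_cases hcol : ':' ∈ L
  · rcases pv_exists_first_colon L hcol with ⟨k, r, hk, hdecomp⟩
    have hsw : ∀ stem : String, ':' ∉ stem.toList →
        PySem.Str.startswith (PySem.Str.lstrip line) (String.ofList (stem.toList ++ [':']))
          = (k == stem.toList) := by
      intro stem hstem
      rw [PySem.Str.startswith, hls, hdecomp]
      rw [String.toList_ofList]
      exact pv_startswith_colon k r stem.toList hk hstem
    have h1 : PySem.Str.startswith (PySem.Str.lstrip line) "Examples:" = (k == "Examples".toList) := by
      rw [show ("Examples:" : String) = String.ofList ("Examples".toList ++ [':']) by decide]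
      exact hsw "Examples" (by decide)
    have h2 : PySem.Str.startswith (PySem.Str.lstrip line) "Background:" = (k == "Background".toList) := by
      rw [show ("Background:" : String) = String.ofList ("Background".toList ++ [':']) by decide]
      exact hsw "Background" (by decide)
    have h3 : PySem.Str.startswith (PySem.Str.lstrip line) "Scenario:" = (k == "Scenario".toList) := by
      rw [show ("Scenario:" : String) = String.ofList ("Scenario".toList ++ [':']) by decide]
      exact hsw "Scenario" (by decide)
    have h4 : PySem.Str.startswith (PySem.Str.lstrip line) "Scenario Outline:" = (k == "Scenario Outline".toList) := by
      rw [show ("Scenario Outline:" : String) = String.ofList ("Scenario Outline".toList ++ [':']) by decide]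
      exact hsw "Scenario Outline" (by decide)
    have hdesc : pvDescA (PySem.Str.lstrip line) = some (String.ofList r) :=
      pv_descA_eq _ k r (by rw [hls, hdecomp]) hk
    have hBpart : pvPartitionColon L = (k, true, r) := by
      rw [hdecomp]; exact pv_partition_colon k r hk
    simp only [hBpart]
    by_cases e1 : k = "Examples".toList
    · subst e1
      have hA : pvLoopA (PySem.Str.lstrip line) pvSectionsA
          = (some "examples", some (String.ofList r)) := by
        simp only [pvSectionsA, pvLoopA, h1, hdesc]
        rw [if_pos (by decide)]
      simp only [hA]
      simp [PySem.Dict.get?, pvSectionsB]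
    · by_cases e2 : k = "Background".toList
      · subst e2
        have hA : pvLoopA (PySem.Str.lstrip line) pvSectionsA
            = (some "background", some (String.ofList r)) := by
          simp only [pvSectionsA, pvLoopA, h1, h2, hdesc]
          rw [if_neg (by decide), if_pos (by decide)]
        simp only [hA]
        simp [PySem.Dict.get?, pvSectionsB]
      · by_cases e3 : k = "Scenario".toList
        · subst e3
          have hA : pvLoopA (PySem.Str.lstrip line) pvSectionsA
              = (some "scenario", some (String.ofList r)) := by
            simp only [pvSectionsA, pvLoopA, h1, h2, h3, hdesc]
            rw [if_neg (by decide), if_neg (by decide), if_pos (by decide)]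
          simp only [hA]
          simp [PySem.Dict.get?, pvSectionsB]
        · by_cases e4 : k = "Scenario Outline".toList
          · subst e4
            have hA : pvLoopA (PySem.Str.lstrip line) pvSectionsA
                = (some "scenario outline", some (String.ofList r)) := by
              simp only [pvSectionsA, pvLoopA, h1, h2, h3, h4, hdesc]
              rw [if_neg (by decide), if_neg (by decide), if_neg (by decide), if_pos (by decide)]
            simp only [hA]
            simp [PySem.Dict.get?, pvSectionsB]
          · simp at e1 e2 e3 e4
            have hA : pvLoopA (PySem.Str.lstrip line) pvSectionsA = (none, none) := by
              simp only [pvSectionsA, pvLoopA]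
              rw [h1, h2, h3, h4]
              simp [e1, e2, e3, e4]
            have hfind : List.find? (fun p => p.1 == k) pvSectionsB.items = none := by
              rw [List.find?_eq_none]
              intro x hx
              simp [pvSectionsB] at hx
              rcases hx with h | h | h | h <;> subst h <;> simp <;> intro hh <;>
                first
                  | exact e1 hh.symm
                  | exact e2 hh.symm
                  | exact e3 hh.symm
                  | exact e4 hh.symm
            have hD : PySem.Dict.get? pvSectionsB k = none := by
              rw [PySem.Dict.get?, hfind]
              rfl
            simp only [hA]
            simp [hD]
  · have hB : pvPartitionColon L = (L, false, []) := pv_partition_no_colon L hcol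
    have hno : ∀ sec : String, ':' ∈ sec.toList →
        PySem.Str.startswith (PySem.Str.lstrip line) sec = false := by
      intro sec hsec
      rw [PySem.Str.startswith, hls]
      exact pv_startswith_no_colon L sec.toList hcol hsec
    have hA : pvLoopA (PySem.Str.lstrip line) pvSectionsA = (none, none) := by
      simp only [pvSectionsA, pvLoopA]
      rw [hno "Examples:" (by decide), hno "Background:" (by decide),
        hno "Scenario:" (by decide), hno "Scenario Outline:" (by decide)]
      simp
    simp only [hA, hB]
    simp

-- ===== VERDICT (by name: the statement is the Claim_ definition above) =====
theorem get_section_start_spec : Claim_equal_get_section_start := by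
  intro line _
  unfold Spec_get_section_start
  exact pv_main line
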